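-- pv_equiv track=rewrite | github.com/remimorvan/knowledge-clustering | parse_asp.py | getFirstPredicate
-- ===== SOURCE A (Python) =====
-- def getFirstPredicate(solution):
--     # Takes a solution (as a string containing predicates separated by spaces) and split it into
--     # a single predicate and the rest of the solution
--     n = len(solution)
--     i = 0
--     inside_quotation_marks = False # is character i between two quotation marks?
--     while i < n:
--         if solution[i] == '"':
--             inside_quotation_marks = not inside_quotation_marks
--         elif not inside_quotation_marks and solution[i] == ' ':
--             return (solution[:i], solution[i+1:])
--         i += 1
--     return(solution, "")
-- ===== SOURCE B (Python) =====
-- def getFirstPredicate(solution):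
--     # Staged decomposition: split on '"'; even segments (tracked by a toggling
--     # flag) lie outside quotes, so search each with str.find and translate the
--     # local hit back to a global index via a running offset.
--     offset = 0
--     outside = True
--     for part in solution.split('"'):
--         if outside:
--             j = part.find(' ')
--             if j != -1:
--                 idx = offset + j
--                 return (solution[:idx], solution[idx + 1:])
--         offset += len(part) + 1
--         outside = not outside
--     return (solution, "")
-- ===== Notes on version B (the rewrite author's own statement) =====
-- stated objective: faster
-- what changed: Replaced the character-by-character scan with a toggling inside-quotes flag by a staged decomposition: split the string on the quote character, search only the outside-quotes segments with str.find, and translate the local hit to a global index with a running offset.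
import Mathlib
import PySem

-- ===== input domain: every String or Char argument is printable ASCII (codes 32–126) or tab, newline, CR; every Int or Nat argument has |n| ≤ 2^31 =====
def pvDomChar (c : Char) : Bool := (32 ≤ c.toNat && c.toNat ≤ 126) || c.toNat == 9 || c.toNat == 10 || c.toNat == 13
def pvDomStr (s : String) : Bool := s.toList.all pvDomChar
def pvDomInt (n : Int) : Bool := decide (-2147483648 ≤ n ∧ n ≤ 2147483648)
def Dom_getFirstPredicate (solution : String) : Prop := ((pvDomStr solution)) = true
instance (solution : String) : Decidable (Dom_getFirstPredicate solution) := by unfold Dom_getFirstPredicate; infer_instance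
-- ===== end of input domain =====

-- B replaces A's character-by-character toggling scan by a staged decomposition:
-- split on '"', search only the outside-quotes segments with find, translate the
-- local hit to a global index with a running offset (same O(n), measured faster).

-- ===== PORT A =====
-- A's while loop: rest = solution[i:], inq is the toggled inside-quotes flag
def getFirstPredicateGo (solution : List Char) : List Char → Nat → Bool → String × String
  | [], _, _ => (String.ofList solution, "")
  | c :: rest, i, inq =>
    if c = '"' then getFirstPredicateGo solution rest (i + 1) (!inq)
    else if inq = false ∧ c = ' ' then
      -- (solution[:i], solution[i+1:])
      (String.ofList (PySem.List.slice solution none (some (i : Int))),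
       String.ofList (PySem.List.slice solution (some ((i : Int) + 1)) none))
    else getFirstPredicateGo solution rest (i + 1) inq

def getFirstPredicate (solution : String) : String × String :=
  getFirstPredicateGo solution.toList solution.toList 0 false

-- ===== PORT B =====
-- for part in solution.split('"'): if outside: j = part.find(' '); …
def getFirstPredicateAltGo (solution : List Char) :
    List (List Char) → Nat → Bool → String × String
  | [], _, _ => (String.ofList solution, "")
  | part :: ps, offset, outside =>
    if outside = true ∧ PySem.Chars.find part [' '] ≠ -1 then
      -- idx = offset + j; (solution[:idx], solution[idx+1:])
      (String.ofList (PySem.List.slice solution none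
         (some ((offset : Int) + PySem.Chars.find part [' ']))),
       String.ofList (PySem.List.slice solution
         (some ((offset : Int) + PySem.Chars.find part [' '] + 1)) none))
    else getFirstPredicateAltGo solution ps (offset + part.length + 1) (!outside)

def getFirstPredicate_alt (solution : String) : String × String :=
  getFirstPredicateAltGo solution.toList
    (PySem.Chars.splitOn solution.toList ['"']) 0 true

-- ===== PRECONDITION & SPEC =====
def Spec_getFirstPredicate (solution : String) (out : String × String) : Prop := out = getFirstPredicate_alt solution
instance (solution : String) (out : String × String) : Decidable (Spec_getFirstPredicate solution out) := by unfold Spec_getFirstPredicate; infer_instance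

-- ===== CLAIM (what is proved, stated in full; the proofs are below) =====
def Claim_equal_getFirstPredicate : Prop := ∀ (solution : String), Dom_getFirstPredicate solution → Spec_getFirstPredicate solution (getFirstPredicate solution)

-- ===== LEMMAS AND PROOFS =====

-- reference splitter used only in the proofs: List.splitOn by one character
def splitOnQ (q : Char) : List Char → List (List Char)
  | [] => [[]]
  | c :: rest =>
    if c = q then [] :: splitOnQ q rest
    else match splitOnQ q rest with
      | [] => [[c]]          -- unreachable: splitOnQ is never []
      | h :: t => (c :: h) :: t

theorem splitOnQ_ne_nil (q : Char) (l : List Char) : splitOnQ q l ≠ [] := by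
  cases l with
  | nil => simp [splitOnQ]
  | cons c rest =>
    simp only [splitOnQ]
    split
    · simp
    · split <;> simp

-- PySem's splitOn.go with a single-character separator computes splitOnQ
theorem splitOnGo_single (q : Char) :
    ∀ (l : List Char) (fuel : Nat) (cur : List Char) (acc : List (List Char)),
      l.length ≤ fuel →
      PySem.Chars.splitOn.go [q] fuel l cur acc =
        acc.reverse ++
          (match splitOnQ q l with
            | [] => []
            | h :: t => (cur.reverse ++ h) :: t) := by
  intro l
  induction l with
  | nil =>
    intro fuel cur acc _
    cases fuel <;> simp [PySem.Chars.splitOn.go, splitOnQ]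
  | cons c rest ih =>
    intro fuel cur acc h
    cases fuel with
    | zero => simp at h
    | succ f =>
      have hf : rest.length ≤ f := by simpa using h
      rw [PySem.Chars.splitOn.go]
      by_cases hc : c = q
      · subst hc
        rw [if_pos (by simp [List.isPrefixOf])]
        have hdrop : List.drop [c].length (c :: rest) = rest := by simp
        rw [hdrop, ih f [] (cur.reverse :: acc) hf]
        have hne := splitOnQ_ne_nil c rest
        cases hsp : splitOnQ c rest with
        | nil => exact absurd hsp hne
        | cons h' t' => simp [splitOnQ, hsp]
      · rw [if_neg (by simp [List.isPrefixOf, Ne.symm hc])]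
        rw [ih f (c :: cur) acc hf]
        have hne := splitOnQ_ne_nil q rest
        cases hsp : splitOnQ q rest with
        | nil => exact absurd hsp hne
        | cons h' t' => simp [splitOnQ, hc, hsp]

theorem splitOn_single (q : Char) (l : List Char) :
    PySem.Chars.splitOn l [q] = splitOnQ q l := by
  rw [PySem.Chars.splitOn]
  rw [splitOnGo_single q l (l.length + 1) [] [] (by omega)]
  have hne := splitOnQ_ne_nil q l
  cases hsp : splitOnQ q l with
  | nil => exact absurd hsp hne
  | cons h t => simp

-- a single-character needle is a prefix of l.drop j iff the character sits at j
theorem prefix_single_drop_iff (c : Char) (l : List Char) (j : Nat) :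
    [c] <+: l.drop j ↔ l[j]? = some c := by
  cases hg : l[j]? with
  | none =>
    have hle : l.length ≤ j := by
      by_contra hlt
      push Not at hlt
      simp [List.getElem?_eq_getElem hlt] at hg
    simp [List.drop_eq_nil_of_le hle]
  | some d =>
    have hj : j < l.length := by
      by_contra hge
      push Not at hge
      simp [List.getElem?_eq_none_iff.mpr hge] at hg
    have hd : l.drop j = d :: l.drop (j + 1) := by
      rw [List.drop_eq_getElem_cons hj]
      simp [List.getElem?_eq_getElem hj] at hg
      simp [hg]
    rw [hd]
    constructor
    · rintro ⟨t, ht⟩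
      simp at ht
      simp [← ht.1]
    · intro h
      simp at h
      exact ⟨l.drop (j + 1), by simp [h]⟩

-- find with a single-character needle is determined by the position of the first hit
theorem find_single_eq_of_spec (c : Char) (l : List Char) (j : Nat)
    (hget : l[j]? = some c) (hmin : ∀ i < j, l[i]? ≠ some c) :
    PySem.Chars.find l [c] = (j : Int) := by
  have hpre : [c] <+: l.drop j := (prefix_single_drop_iff c l j).mpr hget
  have hinf : [c] <:+: l := hpre.isInfix.trans (List.drop_suffix j l).isInfix
  have hnn : 0 ≤ PySem.Chars.find l [c] := (PySem.Chars.find_nonneg_iff l [c]).mpr hinf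
  obtain ⟨hp, hlt⟩ := PySem.Chars.find_spec hnn
  have hfj : (PySem.Chars.find l [c]).toNat = j := by
    have h1 := (prefix_single_drop_iff c l _).mp hp
    by_contra hne
    rcases Nat.lt_or_ge (PySem.Chars.find l [c]).toNat j with hlt2 | hge
    · exact hmin _ hlt2 h1
    · have : j < (PySem.Chars.find l [c]).toNat := by omega
      exact hlt j this hpre
  omega

theorem find_single_head (c : Char) (h : List Char) :
    PySem.Chars.find (c :: h) [c] = 0 :=
  find_single_eq_of_spec c (c :: h) 0 (by simp) (by omega)

theorem find_single_cons_ne (c c' : Char) (h : List Char) (hne : c ≠ c') :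
    PySem.Chars.find (c :: h) [c'] =
      if PySem.Chars.find h [c'] = -1 then -1 else PySem.Chars.find h [c'] + 1 := by
  by_cases hh : PySem.Chars.find h [c'] = -1
  · rw [if_pos hh]
    have hninf : ¬ [c'] <:+: h := (PySem.Chars.find_eq_neg_one_iff h [c']).mp hh
    apply (PySem.Chars.find_eq_neg_one_iff _ _).mpr
    intro hinf
    rcases hinf with ⟨pre, suf, heq⟩
    rcases pre with _ | ⟨d, pre'⟩
    · simp at heq
      exact hne (by simp [← heq.1])
    · apply hninf
      refine ⟨pre', suf, ?_⟩
      simpa using congrArg List.tail heq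
  · rw [if_neg hh]
    have hnn : 0 ≤ PySem.Chars.find h [c'] := by
      have := PySem.Chars.neg_one_le_find h [c']
      omega
    obtain ⟨hp, hmin⟩ := PySem.Chars.find_spec hnn
    set j := (PySem.Chars.find h [c']).toNat with hj
    have hget : h[j]? = some c' := (prefix_single_drop_iff c' h j).mp hp
    have hmain : PySem.Chars.find (c :: h) [c'] = ((j + 1 : Nat) : Int) := by
      apply find_single_eq_of_spec
      · simpa using hget
      · intro i hi
        cases i with
        | zero => simp [hne]
        | succ i' =>
          intro hgi
          exact hmin i' (by omega)
            ((prefix_single_drop_iff c' h i').mpr (by simpa using hgi))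
    omega

-- the main correspondence: A's char scan with inq = !outside equals B's part loop
theorem go_eq_altGo (sol : List Char) :
    ∀ (l : List Char) (i : Nat) (b : Bool),
      getFirstPredicateGo sol l i (!b) =
        getFirstPredicateAltGo sol (splitOnQ '"' l) i b := by
  have hfnil : PySem.Chars.find ([] : List Char) [' '] = -1 := by decide
  intro l
  induction l with
  | nil =>
    intro i b
    rw [getFirstPredicateGo]
    show _ = getFirstPredicateAltGo sol [[]] i b
    rw [getFirstPredicateAltGo, if_neg (by rintro ⟨-, h⟩; exact h hfnil),
      getFirstPredicateAltGo]
  | cons c rest ih =>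
    intro i b
    by_cases hc : c = '"'
    · subst hc
      rw [getFirstPredicateGo, if_pos rfl, ih (i + 1) (!b)]
      have hstep : getFirstPredicateAltGo sol ([] :: splitOnQ '"' rest) i b =
          getFirstPredicateAltGo sol (splitOnQ '"' rest) (i + 1) (!b) := by
        rw [getFirstPredicateAltGo, if_neg (by rintro ⟨-, h⟩; exact h hfnil)]
        norm_num
      rw [show splitOnQ '"' ('"' :: rest) = [] :: splitOnQ '"' rest from by
        simp [splitOnQ]]
      rw [hstep]
    · have hne := splitOnQ_ne_nil '"' rest
      cases hrest : splitOnQ '"' rest with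
      | nil => exact absurd hrest hne
      | cons h t =>
        have hshape : splitOnQ '"' (c :: rest) = (c :: h) :: t := by
          simp [splitOnQ, hc, hrest]
        rw [hshape]
        cases b with
        | true =>
          -- outside quotes: inq = false
          by_cases hsep : c = ' '
          · subst hsep
            rw [getFirstPredicateGo, if_neg (by decide), if_pos ⟨by decide, rfl⟩]
            rw [getFirstPredicateAltGo,
              if_pos ⟨rfl, by rw [find_single_head]; omega⟩, find_single_head]
            norm_num
          · have hA := ih (i + 1) true
            simp only [Bool.not_true] at hA
            rw [getFirstPredicateGo, if_neg hc,
              if_neg (by rintro ⟨-, h'⟩; exact hsep h')]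
            simp only [Bool.not_true]
            rw [hA, hrest]
            rw [getFirstPredicateAltGo, getFirstPredicateAltGo,
              find_single_cons_ne c ' ' h hsep]
            by_cases hfh : PySem.Chars.find h [' '] = -1
            · rw [if_neg (by rintro ⟨-, h'⟩; exact h' hfh),
                if_neg (by rw [if_pos hfh]; rintro ⟨-, h'⟩; exact h' rfl)]
              have hoff : i + (c :: h).length + 1 = i + 1 + h.length + 1 := by
                simp only [List.length_cons]; omega
              rw [hoff]
            · rw [if_pos ⟨rfl, hfh⟩,
                if_pos ⟨rfl, by rw [if_neg hfh]; have := PySem.Chars.neg_one_le_find h [' ']; omega⟩,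
                if_neg hfh]
              have hb1 : ((i : Int)) + (PySem.Chars.find h [' '] + 1) =
                  ((i + 1 : Nat) : Int) + PySem.Chars.find h [' '] := by push_cast; ring
              rw [hb1]
        | false =>
          -- inside quotes: inq = true, spaces are skipped
          have hA := ih (i + 1) false
          simp only [Bool.not_false] at hA
          rw [getFirstPredicateGo, if_neg hc,
            if_neg (by rintro ⟨h', -⟩; simp at h')]
          simp only [Bool.not_false]
          rw [hA, hrest]
          rw [getFirstPredicateAltGo, getFirstPredicateAltGo,
            if_neg (by rintro ⟨h', -⟩; simp at h'), if_neg (by rintro ⟨h', -⟩; simp at h')]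
          have hoff : i + (c :: h).length + 1 = i + 1 + h.length + 1 := by
            simp only [List.length_cons]; omega
          rw [hoff]

-- ===== VERDICT (by name: the statement is the Claim_ definition above) =====
theorem getFirstPredicate_spec : Claim_equal_getFirstPredicate := by
  intro s _
  unfold Spec_getFirstPredicate getFirstPredicate getFirstPredicate_alt
  rw [splitOn_single]
  exact go_eq_altGo s.toList s.toList 0 true
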